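-- pv_equiv track=rewrite | github.com/diksha/cv_experiment | voxy/core/labeling/tools/pull_kinesis_feed_site.py | stream_name_to_uuid
-- ===== SOURCE A (Python) =====
-- def stream_name_to_uuid(stream_name: str) -> str:
--     """
--     Converts the stream name (organization-location-zone) to a camera uuid format
--     (organization/location/zone/cha)
--
--     Args:
--         stream_name (str): raw stream name (organization-location-zone)
--
--     Returns:
--         str: the interpretted uuid name
--     """
--     uuid = stream_name.replace("-", "/") + "/cha"
--     # the camera uuid is usually something like:
--     # americold/modesto/0001/cha
--     # but sometimes it's
--     # americold/savannah_bloomingdale/0001/cha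
--     # the candidate would be
--     # americold/savannah/bloomingdale/0001/cha
--     # we want to replace this intermediate /
--     if uuid.count("/") > 3:
--         extra_slash = uuid.count("/") - 3
--         # we seek to the second / and keep removing until we have no extra slashes
--         while extra_slash > 0:
--             location = uuid.find("/", uuid.find("/") + 1)
--             list_uuid = list(uuid)
--             list_uuid[location] = "_"
--             uuid = "".join(list_uuid)
--             extra_slash -= 1
--
--     return uuid
-- ===== SOURCE B (Python) =====
-- def stream_name_to_uuid(stream_name: str) -> str:
--     parts = (stream_name.replace("-", "/") + "/cha").split("/")
--     if len(parts) <= 4: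
--         return "/".join(parts)
--     return "/".join([parts[0], "_".join(parts[1:-2]), parts[-2], parts[-1]])
-- ===== Notes on version B (the rewrite author's own statement) =====
-- stated objective: simpler
-- what changed: Replaces A's repeated find-second-slash / list-rebuild while-loop with a single slash-split followed by one join that merges the middle segments with underscores.
import Mathlib
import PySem

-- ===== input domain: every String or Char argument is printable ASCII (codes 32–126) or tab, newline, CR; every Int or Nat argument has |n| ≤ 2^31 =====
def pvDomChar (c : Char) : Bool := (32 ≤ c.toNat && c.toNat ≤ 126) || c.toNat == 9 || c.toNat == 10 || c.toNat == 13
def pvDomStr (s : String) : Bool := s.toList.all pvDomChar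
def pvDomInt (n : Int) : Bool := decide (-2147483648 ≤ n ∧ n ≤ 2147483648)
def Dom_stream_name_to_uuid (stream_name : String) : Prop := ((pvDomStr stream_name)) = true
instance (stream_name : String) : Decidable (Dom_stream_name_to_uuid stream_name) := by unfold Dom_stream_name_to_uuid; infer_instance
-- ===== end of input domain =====

-- B replaces A's repeated find-second-slash / rebuild while-loop by one slash-split and one join
-- that merges the middle segments with underscores (objective: simpler).

-- ===== PORT A =====
-- the while-loop: each iteration finds the second '/' and overwrites it with '_'
def pvSlashLoop : Nat → List Char → List Char
  | 0, u => u
  | k + 1, u =>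
      let location := PySem.Chars.findFrom u ['/'] (PySem.Chars.find u ['/'] + 1)
      pvSlashLoop k (PySem.List.pySetD u location '_')

def stream_name_to_uuid (stream_name : String) : String :=
  let uuid := PySem.Chars.replace stream_name.toList ['-'] ['/'] ++ "/cha".toList
  if 3 < PySem.Chars.count uuid ['/'] then
    String.ofList (pvSlashLoop (PySem.Chars.count uuid ['/'] - 3) uuid)
  else
    String.ofList uuid

-- ===== PORT B =====
def stream_name_to_uuid_alt (stream_name : String) : String :=
  let parts := PySem.Chars.splitOn (PySem.Chars.replace stream_name.toList ['-'] ['/'] ++ "/cha".toList) ['/']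
  if parts.length ≤ 4 then
    String.ofList (PySem.Chars.join ['/'] parts)
  else
    String.ofList (PySem.Chars.join ['/']
      [PySem.List.pyGetD parts 0 [],
       PySem.Chars.join ['_'] (PySem.List.slice parts (some 1) (some (-2))),
       PySem.List.pyGetD parts (-2) [],
       PySem.List.pyGetD parts (-1) []])

-- ===== PRECONDITION & SPEC =====
def Spec_stream_name_to_uuid (stream_name : String) (out : String) : Prop := out = stream_name_to_uuid_alt stream_name
instance (stream_name : String) (out : String) : Decidable (Spec_stream_name_to_uuid stream_name out) := by unfold Spec_stream_name_to_uuid; infer_instance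

-- ===== CLAIM (what is proved, stated in full; the proofs are below) =====
def Claim_equal_stream_name_to_uuid : Prop := ∀ (stream_name : String), Dom_stream_name_to_uuid stream_name → Spec_stream_name_to_uuid stream_name (stream_name_to_uuid stream_name)

-- ===== LEMMAS AND PROOFS =====

-- `s.count('/')` (PySem fuel loop) counts single-char occurrences
theorem pvCountGo (l : List Char) : ∀ (fuel acc : Nat), l.length ≤ fuel →
    PySem.Chars.count.go ['/'] fuel l acc = acc + l.count '/' := by
  induction l with
  | nil => intro fuel acc _; rw [PySem.Chars.count.go.eq_def]; cases fuel <;> simp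
  | cons c t ih =>
      intro fuel acc hf
      cases fuel with
      | zero => simp at hf
      | succ f =>
          rw [PySem.Chars.count.go.eq_def]
          simp only [List.isPrefixOf, Bool.and_true, List.count_cons]
          by_cases hc : c = '/'
          · subst hc
            simp only [beq_self_eq_true, if_pos, List.length_cons] at *
            have hdrop : List.drop (List.length (α := Char) [] + 1) ('/' :: t) = t := by simp
            rw [hdrop, ih f (acc + 1) (by omega)]
            omega
          · have h1 : (('/' : Char) == c) = false := by simp; exact fun h => hc h.symm
            have h2 : ((c : Char) == '/') = false := by simp [hc]
            simp only [h1, Bool.false_eq_true, if_false]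
            rw [ih f acc (by simpa using Nat.le_of_succ_le_succ hf)]
            simp [h1, h2]
  termination_by l.length

theorem pvCountEq (u : List Char) : PySem.Chars.count u ['/'] = u.count '/' := by
  rw [PySem.Chars.count]
  simp only [List.isEmpty_cons, if_false, Bool.false_eq_true]
  simpa using pvCountGo u u.length 0 le_rfl

-- PySem's splitOn (fuel loop) agrees with Mathlib's List.splitOn for a one-char separator
theorem pvSplitGo (l : List Char) : ∀ (fuel : Nat) (cur : List Char) (acc : List (List Char)),
    l.length ≤ fuel →
    PySem.Chars.splitOn.go ['/'] fuel l cur acc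
      = acc.reverse ++ (List.splitOnP (· == '/') l).modifyHead (cur.reverse ++ ·) := by
  induction l with
  | nil =>
      intro fuel cur acc _
      rw [PySem.Chars.splitOn.go.eq_def]
      cases fuel <;> simp
  | cons c t ih =>
      intro fuel cur acc hf
      cases fuel with
      | zero => simp at hf
      | succ f =>
          rw [PySem.Chars.splitOn.go.eq_def]
          simp only [List.isPrefixOf, Bool.and_true]
          by_cases hc : c = '/'
          · subst hc
            simp only [beq_self_eq_true, if_pos]
            simp only [List.length_cons, List.length_nil, List.drop_succ_cons, List.drop_zero]
            rw [ih f [] (cur.reverse :: acc) (by simpa using Nat.le_of_succ_le_succ hf)]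
            simp only [List.splitOnP_cons, beq_self_eq_true, if_pos, List.reverse_nil]
            cases List.splitOnP (fun x => x == '/') t <;> simp
          · have hb : (('/' : Char) == c) = false := by simp [hc]; exact fun h => hc h.symm
            have hb' : ((c : Char) == '/') = false := by simp [hc]
            simp only [hb, Bool.false_and, Bool.false_eq_true, if_false]
            rw [ih f (c :: cur) acc (by simpa using Nat.le_of_succ_le_succ hf)]
            simp only [List.splitOnP_cons, hb', Bool.false_eq_true, if_false,
              List.modifyHead_modifyHead]
            have hfun : ((fun x : List Char => cur.reverse ++ x) ∘ List.cons c)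
                = (fun x : List Char => (c :: cur).reverse ++ x) := by
              funext x; simp
            rw [hfun]
  termination_by l.length

theorem pvSplitEq (u : List Char) : PySem.Chars.splitOn u ['/'] = List.splitOn '/' u := by
  rw [PySem.Chars.splitOn, pvSplitGo u (u.length + 1) [] [] (by omega)]
  simp only [List.splitOn, List.reverse_nil, List.nil_append]
  cases List.splitOnP (fun x => x == '/') u <;> simp

-- pieces of splitOn contain no separator
theorem pvSplitFree (u : List Char) : ∀ p ∈ List.splitOn '/' u, '/' ∉ p := by
  unfold List.splitOn
  induction u with
  | nil => simp
  | cons c t ih =>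
      intro p hp
      rw [List.splitOnP_cons] at hp
      by_cases hc : c = '/'
      · subst hc; simp only [beq_self_eq_true, if_pos] at hp
        rcases List.mem_cons.1 hp with h | h
        · simp [h]
        · exact ih p h
      · have hb : ((c : Char) == '/') = false := by simp [hc]
        simp only [hb, Bool.false_eq_true, if_false] at hp
        obtain ⟨h0, tl, hsp⟩ := List.exists_cons_of_ne_nil (List.splitOnP_ne_nil (· == '/') t)
        rw [hsp, List.modifyHead_cons] at hp
        rcases List.mem_cons.1 hp with h | h
        · subst h
          intro hm
          rcases List.mem_cons.1 hm with h | h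
          · exact hc h.symm
          · exact ih h0 (by rw [hsp]; exact List.mem_cons_self) h
        · exact ih p (by rw [hsp]; exact List.mem_cons_of_mem _ h)

-- find of a one-char needle lands on the first slash
theorem pvFindFirst (a b : List Char) (ha : '/' ∉ a) :
    PySem.Chars.find (a ++ '/' :: b) ['/'] = (a.length : Int) := by
  have hdrop : List.drop a.length (a ++ '/' :: b) = '/' :: b := List.drop_left
  have hpre : ['/'] <+: List.drop a.length (a ++ '/' :: b) := by rw [hdrop]; exact ⟨b, rfl⟩
  have hinf : ['/'] <:+: (a ++ '/' :: b) := hpre.isInfix.trans (List.drop_suffix _ _).isInfix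
  have h0 : 0 ≤ PySem.Chars.find (a ++ '/' :: b) ['/'] := (PySem.Chars.find_nonneg_iff _ _).2 hinf
  obtain ⟨hp, hmin⟩ := PySem.Chars.find_spec h0
  set n := (PySem.Chars.find (a ++ '/' :: b) ['/']).toNat with hn
  have hle : n ≤ a.length := by
    by_contra hlt
    exact hmin a.length (by omega) hpre
  have hge : ¬ n < a.length := by
    intro hlt
    obtain ⟨tl, htl⟩ := hp
    rw [List.drop_append_of_le_length (by omega), List.drop_eq_getElem_cons hlt,
      List.singleton_append] at htl
    have hhd : ('/' : Char) = a[n] := (List.cons_eq_cons.mp htl).1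
    have hm : a[n] ∈ a := List.getElem_mem hlt
    rw [← hhd] at hm
    exact ha hm
  have : n = a.length := by omega
  omega

-- findFrom just past the first slash lands on the second slash
theorem pvFindSecond (a b c : List Char) (ha : '/' ∉ a) (hb : '/' ∉ b) :
    PySem.Chars.findFrom (a ++ '/' :: (b ++ '/' :: c)) ['/'] ((a.length : Int) + 1)
      = (a.length : Int) + 1 + b.length := by
  have hk : a.length + 1 ≤ (a ++ '/' :: (b ++ '/' :: c)).length := by
    simp only [List.length_append, List.length_cons]
    omega
  have hcast : ((a.length : Int) + 1) = ((a.length + 1 : Nat) : Int) := by push_cast; ring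
  rw [hcast, PySem.Chars.findFrom_natCast _ _ _ hk]
  have hsplit : a ++ '/' :: (b ++ '/' :: c) = (a ++ ['/']) ++ (b ++ '/' :: c) := by simp
  have hlen : (a ++ ['/']).length = a.length + 1 := by simp
  have hdrop : List.drop (a.length + 1) (a ++ '/' :: (b ++ '/' :: c)) = b ++ '/' :: c := by
    rw [hsplit]
    exact List.drop_left' hlen
  rw [hdrop, pvFindFirst b c hb]
  have hne : ¬ ((b.length : Int) = -1) := by omega
  rw [if_neg hne]
  try push_cast
  try ring
  try omega

-- overwriting the second slash merges the 2nd and 3rd parts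
theorem pvSetSecond (a b c : List Char) :
    (a ++ '/' :: (b ++ '/' :: c)).set (a.length + 1 + b.length) '_' = a ++ '/' :: (b ++ '_' :: c) := by
  rw [List.set_append, if_neg (by omega)]
  congr 1
  have h1 : a.length + 1 + b.length - a.length = b.length + 1 := by omega
  rw [h1, List.set_cons_succ]
  congr 1
  rw [List.set_append, if_neg (by omega), Nat.sub_self, List.set_cons_zero]

-- joining with '/': merged head
theorem pvJoinMergeSlash (p q : List Char) (rest : List (List Char)) :
    PySem.Chars.join ['/'] ((p ++ '_' :: q) :: rest) = p ++ '_' :: PySem.Chars.join ['/'] (q :: rest) := by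
  cases rest with
  | nil => rw [PySem.Chars.join_singleton, PySem.Chars.join_singleton]
  | cons r rs => rw [PySem.Chars.join_cons_cons, PySem.Chars.join_cons_cons]; simp

theorem pvJoinMergeUnd (p q : List Char) (rest : List (List Char)) :
    PySem.Chars.join ['_'] ((p ++ '_' :: q) :: rest) = PySem.Chars.join ['_'] (p :: q :: rest) := by
  cases rest with
  | nil => rw [PySem.Chars.join_singleton, PySem.Chars.join_cons_cons, PySem.Chars.join_singleton]; simp
  | cons r rs =>
      rw [PySem.Chars.join_cons_cons, PySem.Chars.join_cons_cons, PySem.Chars.join_cons_cons]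
      simp

-- one loop iteration, on the split representation
theorem pvStep (p0 p q : List Char) (rest : List (List Char)) (h0 : '/' ∉ p0) (hp : '/' ∉ p) :
    (let u := PySem.Chars.join ['/'] (p0 :: p :: q :: rest);
     PySem.List.pySetD u (PySem.Chars.findFrom u ['/'] (PySem.Chars.find u ['/'] + 1)) '_')
      = PySem.Chars.join ['/'] (p0 :: (p ++ '_' :: q) :: rest) := by
  have hu : PySem.Chars.join ['/'] (p0 :: p :: q :: rest)
      = p0 ++ '/' :: (p ++ '/' :: PySem.Chars.join ['/'] (q :: rest)) := by
    rw [PySem.Chars.join_cons_cons, PySem.Chars.join_cons_cons]; simp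
  simp only [hu]
  rw [pvFindFirst p0 _ h0, pvFindSecond p0 p _ h0 hp]
  have hcast : ((p0.length : Int) + 1 + p.length) = ((p0.length + 1 + p.length : Nat) : Int) := by
    push_cast; ring
  rw [hcast, PySem.List.pySetD_natCast, pvSetSecond]
  rw [PySem.Chars.join_cons_cons, pvJoinMergeSlash]
  simp

-- the whole loop merges the first (f+1) tail parts with underscores
theorem pvLoop : ∀ (f : Nat) (p0 : List Char) (tail : List (List Char)),
    '/' ∉ p0 → (∀ p ∈ tail, '/' ∉ p) → tail.length = f + 3 →
    pvSlashLoop f (PySem.Chars.join ['/'] (p0 :: tail))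
      = PySem.Chars.join ['/'] (p0 :: PySem.Chars.join ['_'] (tail.take (f + 1)) :: tail.drop (f + 1)) := by
  intro f
  induction f with
  | zero =>
      intro p0 tail _ _ hlen
      obtain ⟨x, y, z, rfl⟩ := List.length_eq_three.1 hlen
      simp [pvSlashLoop, PySem.Chars.join_singleton]
  | succ f ih =>
      intro p0 tail h0 htail hlen
      match tail, hlen with
      | p :: q :: rest, hlen =>
        have hp : '/' ∉ p := htail p List.mem_cons_self
        have hq : '/' ∉ q := htail q (List.mem_cons_of_mem _ List.mem_cons_self)
        show pvSlashLoop f _ = _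
        rw [pvStep p0 p q rest h0 hp]
        rw [ih p0 ((p ++ '_' :: q) :: rest)
              h0
              (by
                intro r hr
                rcases List.mem_cons.1 hr with h | h
                · subst h
                  intro hm
                  rcases List.mem_append.1 hm with h | h
                  · exact hp h
                  · rcases List.mem_cons.1 h with h | h
                    · exact absurd h (by decide)
                    · exact hq h
                · exact htail r (List.mem_cons_of_mem _ (List.mem_cons_of_mem _ h)))
              (by simp at hlen ⊢; omega)]
        simp only [List.take_succ_cons, List.drop_succ_cons]
        rw [pvJoinMergeUnd]

-- count of '/' in a join of slash-free parts
theorem pvCountJoin : ∀ (ps : List (List Char)), (∀ p ∈ ps, '/' ∉ p) →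
    List.count '/' (PySem.Chars.join ['/'] ps) = ps.length - 1 := by
  intro ps
  induction ps with
  | nil => simp [PySem.Chars.join_nil]
  | cons p rest ih =>
      intro hfree
      cases rest with
      | nil =>
          rw [PySem.Chars.join_singleton]
          simp [List.count_eq_zero.2 (hfree p List.mem_cons_self)]
      | cons q rs =>
          rw [PySem.Chars.join_cons_cons]
          have h1 : List.count '/' p = 0 := List.count_eq_zero.2 (hfree p List.mem_cons_self)
          have h2 := ih (fun r hr => hfree r (List.mem_cons_of_mem _ hr))
          simp only [List.count_append, h1, h2]
          simp only [List.length_cons, List.count_cons, List.count_singleton]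
          simp; omega

-- Python-style indexing/slicing facts used by B's port
theorem pvGet0 {α : Type} (x : α) (l : List α) (d : α) :
    PySem.List.pyGetD (x :: l) 0 d = x := by
  simp [PySem.List.pyGetD, PySem.List.pyGet?, PySem.List.pyIdx?]

theorem pvGetNeg1 {α : Type} (l : List α) (z d : α) :
    PySem.List.pyGetD (l ++ [z]) (-1) d = z := by
  unfold PySem.List.pyGetD PySem.List.pyGet? PySem.List.pyIdx?
  rw [if_neg (by omega), if_pos (by simp only [List.length_append, List.length_cons, List.length_nil]; omega)]
  have h3 : (l ++ [z]).length - (-(-1 : Int)).toNat = l.length := by simp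
  simp [h3, List.getElem?_concat_length]

theorem pvGetNeg2 {α : Type} (l : List α) (y z d : α) :
    PySem.List.pyGetD (l ++ [y, z]) (-2) d = y := by
  unfold PySem.List.pyGetD PySem.List.pyGet? PySem.List.pyIdx?
  rw [if_neg (by omega), if_pos (by simp only [List.length_append, List.length_cons, List.length_nil]; omega)]
  have h3 : (l ++ [y, z]).length - (-(-2 : Int)).toNat = l.length := by simp
  rw [h3]
  simp [List.getElem?_append_right (Nat.le_refl l.length)]

theorem pvSliceMid {α : Type} (x y z : α) (ys : List α) :
    PySem.List.slice (x :: (ys ++ [y, z])) (some 1) (some (-2)) = ys := by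
  have hlen : (x :: (ys ++ [y, z])).length = ys.length + 3 := by simp
  simp only [PySem.List.slice, PySem.List.clampIdx, hlen]
  norm_num
  rw [if_neg (by omega)]
  have h2 : ((ys.length : Int) + 3 + -2).toNat = ys.length + 1 := by omega
  rw [h2]
  simp only [Nat.add_sub_cancel]
  exact List.take_left' rfl

-- the core list-level equivalence
theorem pvCore (u : List Char) :
    (if 3 < PySem.Chars.count u ['/'] then pvSlashLoop (PySem.Chars.count u ['/'] - 3) u else u)
      = (let parts := PySem.Chars.splitOn u ['/'];
         if parts.length ≤ 4 then PySem.Chars.join ['/'] parts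
         else PySem.Chars.join ['/']
           [PySem.List.pyGetD parts 0 [],
            PySem.Chars.join ['_'] (PySem.List.slice parts (some 1) (some (-2))),
            PySem.List.pyGetD parts (-2) [],
            PySem.List.pyGetD parts (-1) []]) := by
  have hsp := pvSplitEq u
  set ps := List.splitOn '/' u with hps
  have hfree : ∀ p ∈ ps, '/' ∉ p := pvSplitFree u
  have hne : ps ≠ [] := by
    rw [hps]; unfold List.splitOn; exact List.splitOnP_ne_nil _ _
  have hu : PySem.Chars.join ['/'] ps = u := by
    rw [hps, PySem.Chars.join.eq_1]; exact List.intercalate_splitOn u '/'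
  have hcount : PySem.Chars.count u ['/'] = ps.length - 1 := by
    rw [pvCountEq, ← hu]; exact pvCountJoin ps hfree
  simp only [hsp]
  by_cases hlen : ps.length ≤ 4
  · have hnc : ¬ 3 < PySem.Chars.count u ['/'] := by rw [hcount]; omega
    rw [if_neg hnc, if_pos hlen, hu]
  · obtain ⟨p0, tail, hps2⟩ : ∃ p0 tail, ps = p0 :: tail := by
      cases hcc : ps with
      | nil => exact absurd hcc hne
      | cons a b => exact ⟨a, b, rfl⟩
    rw [hps2] at hfree hu hcount hlen ⊢
    have htlen4 : 4 ≤ tail.length := by simp at hlen; omega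
    set f := tail.length - 3 with hf
    have htlen : tail.length = f + 3 := by omega
    have hcpos : 3 < PySem.Chars.count u ['/'] := by rw [hcount]; simp; omega
    have hfuel : PySem.Chars.count u ['/'] - 3 = f := by rw [hcount]; simp; omega
    rw [if_pos hcpos, if_neg hlen, hfuel, ← hu]
    rw [pvLoop f p0 tail (hfree p0 List.mem_cons_self)
        (fun p hp => hfree p (List.mem_cons_of_mem _ hp)) htlen]
    have hys : (tail.take (f + 1)).length = f + 1 := by simp; omega
    have hd2 : (tail.drop (f + 1)).length = 2 := by simp; omega
    obtain ⟨y, z, hyz⟩ := List.length_eq_two.mp hd2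
    have htail : tail = tail.take (f + 1) ++ [y, z] := by
      rw [← hyz]; exact (List.take_append_drop _ _).symm
    rw [hyz]
    conv_rhs => rw [htail]
    have e1 : p0 :: (tail.take (f + 1) ++ [y, z]) = (p0 :: tail.take (f + 1)) ++ [y, z] := by simp
    have e2 : p0 :: (tail.take (f + 1) ++ [y, z]) = (p0 :: (tail.take (f + 1) ++ [y])) ++ [z] := by simp
    rw [pvGet0, pvSliceMid,
        show PySem.List.pyGetD (p0 :: (tail.take (f + 1) ++ [y, z])) (-2) [] = y from by
          rw [e1]; exact pvGetNeg2 _ y z [],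
        show PySem.List.pyGetD (p0 :: (tail.take (f + 1) ++ [y, z])) (-1) [] = z from by
          rw [e2]; exact pvGetNeg1 _ z []]

-- ===== VERDICT (by name: the statement is the Claim_ definition above) =====
theorem stream_name_to_uuid_spec : Claim_equal_stream_name_to_uuid := by
  intro s _
  unfold Spec_stream_name_to_uuid stream_name_to_uuid stream_name_to_uuid_alt
  rw [← apply_ite String.ofList, ← apply_ite String.ofList]
  exact congrArg String.ofList (pvCore _)
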